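-- pv_equiv track=rewrite | github.com/343github/Riviera_ThePromisedLand | Font_Extractor.py | read_4bpp_tile_big_endian
-- ===== SOURCE A (Python) =====
-- def read_4bpp_tile_big_endian(data, offset, tile_size=10):
--     tile = []
--     for y in range(tile_size):
--         row = []
--         for x in range(0, tile_size, 2):
--             byte = data[offset]
--             offset += 1
--             high_nibble = byte >> 4
--             low_nibble = byte & 0xF
--             row.extend([high_nibble, low_nibble])
--         tile.append(row)
--     return tile
-- ===== SOURCE B (Python) =====
-- def read_4bpp_tile_big_endian(data, offset, tile_size=10):
--     rows = max(tile_size, 0)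
--     bytes_per_row = (tile_size + 1) // 2
--     width = 2 * bytes_per_row
--     flat = []
--     for i in range(rows * bytes_per_row):
--         byte = data[offset + i]
--         flat.extend([byte >> 4, byte & 0xF])
--     return [flat[r * width:(r + 1) * width] for r in range(rows)]
-- ===== Notes on version B (the rewrite author's own statement) =====
-- stated objective: alternative
-- what changed: Replaces the nested row/column loops with mutating offset by one flat pass over all tile_size*ceil(tile_size/2) bytes building a single nibble list, then reshapes it into rows by slicing fixed-width chunks.
import Mathlib
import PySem

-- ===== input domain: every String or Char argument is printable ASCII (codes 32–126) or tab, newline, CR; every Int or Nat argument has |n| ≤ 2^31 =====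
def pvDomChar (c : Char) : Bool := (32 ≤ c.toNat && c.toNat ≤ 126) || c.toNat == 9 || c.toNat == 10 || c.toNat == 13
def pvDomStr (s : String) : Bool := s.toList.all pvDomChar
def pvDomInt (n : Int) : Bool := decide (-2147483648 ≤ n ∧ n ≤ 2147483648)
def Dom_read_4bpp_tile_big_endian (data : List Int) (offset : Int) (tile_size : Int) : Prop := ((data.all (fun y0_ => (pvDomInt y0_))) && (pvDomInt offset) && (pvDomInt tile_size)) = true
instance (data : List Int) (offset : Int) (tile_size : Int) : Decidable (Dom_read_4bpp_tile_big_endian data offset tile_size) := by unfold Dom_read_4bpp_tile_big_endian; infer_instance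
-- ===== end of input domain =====

-- B replaces A's nested row/column loops with a mutating byte cursor by one flat pass
-- collecting all nibbles and a reshape into fixed-width row slices (alternative decomposition).

-- ===== PORT A =====
-- one inner-loop iteration of A: read data[offset], advance offset, append the two nibbles
def pvStepA (data : List Int) (st : Int × List Int) : Int × List Int :=
  let byte := PySem.List.pyGetD data st.1 0
  (st.1 + 1, st.2 ++ [byte >>> (4 : Nat), PySem.Int.band byte 0xF])

def read_4bpp_tile_big_endian (data : List Int) (offset : Int) (tile_size : Int) : List (List Int) :=
  -- totality guard only: outside it Python A raises IndexError and returns nothing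
  if tile_size ≤ 0 ∨
      (-(data.length : Int) ≤ offset ∧
        offset + tile_size * PySem.Int.floordiv (tile_size + 1) 2 ≤ (data.length : Int)) then
  ((PySem.List.pyRange 0 tile_size 1).foldl
    (fun (st : Int × List (List Int)) _y =>
      let inner := (PySem.List.pyRange 0 tile_size 2).foldl (fun st2 _x => pvStepA data st2) (st.1, [])
      (inner.1, st.2 ++ [inner.2]))
    (offset, [])).2
  else []

-- ===== PORT B =====
-- the two nibbles of data[idx], as B's loop body extends the flat list
def pvNibbles (data : List Int) (idx : Int) : List Int :=
  let byte := PySem.List.pyGetD data idx 0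
  [byte >>> (4 : Nat), PySem.Int.band byte 0xF]

-- B's flat nibble list: one pass over all rows*bytes_per_row consumed bytes
def pvFlat (data : List Int) (offset : Int) (tile_size : Int) : List Int :=
  (PySem.List.pyRange 0 (max tile_size 0 * PySem.Int.floordiv (tile_size + 1) 2) 1).flatMap
    (fun i => pvNibbles data (offset + i))

def read_4bpp_tile_big_endian_alt (data : List Int) (offset : Int) (tile_size : Int) : List (List Int) :=
  -- totality guard only: outside it Python B raises IndexError and returns nothing
  if tile_size ≤ 0 ∨
      (-(data.length : Int) ≤ offset ∧
        offset + tile_size * PySem.Int.floordiv (tile_size + 1) 2 ≤ (data.length : Int)) then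
  (PySem.List.pyRange 0 (max tile_size 0) 1).map
    (fun r => PySem.List.slice (pvFlat data offset tile_size)
      (some (r * (2 * PySem.Int.floordiv (tile_size + 1) 2)))
      (some ((r + 1) * (2 * PySem.Int.floordiv (tile_size + 1) 2))))
  else []

-- ===== PRECONDITION & SPEC =====
-- Pre_ excludes exactly the inputs on which Python A raises IndexError: a positive
-- tile_size whose tile_size*ceil(tile_size/2) byte reads starting at offset leave
-- the valid (negative-wrapping) index range of data.
def Pre_read_4bpp_tile_big_endian (data : List Int) (offset : Int) (tile_size : Int) : Prop :=
  tile_size ≤ 0 ∨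
    (-(data.length : Int) ≤ offset ∧
      offset + tile_size * PySem.Int.floordiv (tile_size + 1) 2 ≤ (data.length : Int))
instance (data : List Int) (offset : Int) (tile_size : Int) : Decidable (Pre_read_4bpp_tile_big_endian data offset tile_size) := by unfold Pre_read_4bpp_tile_big_endian; infer_instance

def pvWitness_read_4bpp_tile_big_endian : List Int × Int × Int := ([18, 52], 0, 2)

def Spec_read_4bpp_tile_big_endian (data : List Int) (offset : Int) (tile_size : Int) (out : List (List Int)) : Prop := out = read_4bpp_tile_big_endian_alt data offset tile_size
instance (data : List Int) (offset : Int) (tile_size : Int) (out : List (List Int)) : Decidable (Spec_read_4bpp_tile_big_endian data offset tile_size out) := by unfold Spec_read_4bpp_tile_big_endian; infer_instance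

-- ===== CLAIM (what is proved, stated in full; the proofs are below) =====
def Claim_equal_read_4bpp_tile_big_endian : Prop := ∀ (data : List Int) (offset : Int) (tile_size : Int), Dom_read_4bpp_tile_big_endian data offset tile_size → Pre_read_4bpp_tile_big_endian data offset tile_size → Spec_read_4bpp_tile_big_endian data offset tile_size (read_4bpp_tile_big_endian data offset tile_size)

-- ===== LEMMAS AND PROOFS =====

-- the row of nibbles obtained by reading b consecutive bytes starting at index o
def pvRow (data : List Int) (o : Int) (b : Nat) : List Int :=
  (List.range b).flatMap (fun (j : Nat) => pvNibbles data (o + j))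

theorem pvRow_succ (data : List Int) (o : Int) (b : Nat) :
    pvRow data o (b + 1) = pvNibbles data o ++ pvRow data (o + 1) b := by
  simp only [pvRow, List.range_succ_eq_map, List.flatMap_cons, List.flatMap_map]
  congr 1
  · simp
  · congr 1
    funext j
    congr 1
    push_cast [Nat.succ_eq_add_one]
    ring

theorem pvRow_length (data : List Int) (o : Int) (b : Nat) :
    (pvRow data o b).length = 2 * b := by
  simp only [pvRow, List.length_flatMap]
  have h : (List.range b).map (fun (a : Nat) => (pvNibbles data (o + a)).length)
      = (List.range b).map (Function.const Nat 2) := by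
    apply List.map_congr_left; intro a _; simp [pvNibbles]
  rw [h, List.map_const, List.sum_replicate]
  simp [mul_comm]

theorem pvInner_eq (data : List Int) (l : List Int) :
    ∀ (o : Int) (r : List Int),
      l.foldl (fun st2 _x => pvStepA data st2) (o, r)
        = (o + l.length, r ++ pvRow data o l.length) := by
  induction l with
  | nil => intro o r; simp [pvRow]
  | cons x xs ih =>
    intro o r
    rw [List.foldl_cons,
      show pvStepA data (o, r) = (o + 1, r ++ pvNibbles data o) from rfl, ih,
      show (x :: xs).length = xs.length + 1 from rfl, pvRow_succ]
    refine Prod.ext ?_ ?_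
    · show o + 1 + (xs.length : Int) = o + ((xs.length + 1 : Nat) : Int)
      push_cast; ring
    · simp

theorem pvOuter_eq (data : List Int) (inL : List Int) (l : List Int) :
    ∀ (o : Int) (tile : List (List Int)),
      l.foldl
        (fun (st : Int × List (List Int)) _y =>
          let inner := inL.foldl (fun st2 _x => pvStepA data st2) (st.1, [])
          (inner.1, st.2 ++ [inner.2]))
        (o, tile)
      = (o + ((l.length * inL.length : Nat) : Int),
         tile ++ (List.range l.length).map
           (fun y => pvRow data (o + ((y * inL.length : Nat) : Int)) inL.length)) := by
  induction l with
  | nil => intro o tile; simp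
  | cons x xs ih =>
    intro o tile
    rw [List.foldl_cons]
    have hstep :
        (let inner := inL.foldl (fun st2 _x => pvStepA data st2) ((o, tile).1, ([] : List Int))
         (inner.1, (o, tile).2 ++ [inner.2]))
        = (o + (inL.length : Int), tile ++ [pvRow data o inL.length]) := by
      show ((inL.foldl (fun st2 _x => pvStepA data st2) (o, ([] : List Int))).1,
            tile ++ [(inL.foldl (fun st2 _x => pvStepA data st2) (o, ([] : List Int))).2])
          = _
      rw [pvInner_eq data inL o []]
      simp
    rw [hstep, ih, show (x :: xs).length = xs.length + 1 from rfl]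
    refine Prod.ext ?_ ?_
    · show o + (inL.length : Int) + ((xs.length * inL.length : Nat) : Int)
          = o + (((xs.length + 1) * inL.length : Nat) : Int)
      push_cast; ring
    · show (tile ++ [pvRow data o inL.length]) ++ (List.range xs.length).map
            (fun y => pvRow data (o + (inL.length : Int) + ((y * inL.length : Nat) : Int)) inL.length)
          = tile ++ (List.range (xs.length + 1)).map
            (fun y => pvRow data (o + ((y * inL.length : Nat) : Int)) inL.length)
      rw [List.range_succ_eq_map, List.map_cons, List.map_map, List.append_assoc]
      congr 1
      simp only [List.cons_append, List.nil_append]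
      congr 1
      · congr 1; push_cast; ring
      · apply List.map_congr_left
        intro a _
        simp only [Function.comp_apply]
        congr 1
        push_cast [Nat.succ_eq_add_one]
        ring

theorem pvGroup (data : List Int) (o : Int) (b : Nat) (n : Nat) :
    (List.range (n * b)).flatMap (fun (k : Nat) => pvNibbles data (o + k))
      = (List.range n).flatMap (fun (y : Nat) => pvRow data (o + ((y * b : Nat) : Int)) b) := by
  induction n with
  | zero => simp
  | succ m ih =>
    rw [show (m + 1) * b = m * b + b by ring, List.range_add, List.flatMap_append,
      List.flatMap_map, ih, List.range_succ, List.flatMap_append]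
    congr 1
    simp only [List.flatMap_cons, List.flatMap_nil, List.append_nil, pvRow]
    congr 1
    funext j
    congr 1
    push_cast; ring

theorem pvChunk {α : Type} (w : Nat) :
    ∀ (L : List (List α)) (r : Nat), (∀ x ∈ L, x.length = w) → r < L.length →
      (L.flatten.drop (r * w)).take w = L.getD r [] := by
  intro L
  induction L with
  | nil => intro r _ h; simp at h
  | cons x xs ih =>
    intro r hlen hr
    cases r with
    | zero =>
      have hx : x.length = w := hlen x (by simp)
      simp only [Nat.zero_mul, List.drop_zero, List.flatten_cons, List.getD_cons_zero]
      rw [← hx, List.take_left]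
    | succ m =>
      have hx : x.length = w := hlen x (by simp)
      simp only [List.flatten_cons, List.getD_cons_succ]
      rw [show (m + 1) * w = x.length + m * w by rw [hx]; ring, ← List.drop_drop,
        List.drop_left]
      exact ih m (fun y hy => hlen y (by simp [hy])) (by simpa using hr)

-- ===== VERDICT (by name: the statement is the Claim_ definition above) =====
theorem read_4bpp_tile_big_endian_spec : Claim_equal_read_4bpp_tile_big_endian := by
  intro data offset t _ hpre
  unfold Pre_read_4bpp_tile_big_endian at hpre
  unfold Spec_read_4bpp_tile_big_endian
  rw [read_4bpp_tile_big_endian, read_4bpp_tile_big_endian_alt, if_pos hpre, if_pos hpre]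
  by_cases ht : t ≤ 0
  · rw [pvOuter_eq, PySem.List.pyRange_one_eq_nil ht,
      PySem.List.pyRange_one_eq_nil (show (max t 0 : Int) ≤ 0 by omega)]
    simp
  · have htp : 0 < t := by omega
    have hb2 : PySem.Int.floordiv (t + 1) 2 = (t + 1) / 2 :=
      PySem.Int.floordiv_eq_ediv_of_pos (by norm_num)
    set n := t.toNat with hn
    set bn := ((t + 1) / 2).toNat with hbn
    have hbnn : (t + 1) / 2 = (bn : Int) := by omega
    have hmax : max t 0 = t := by omega
    have hlen1 : (PySem.List.pyRange 0 t 1).length = n := by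
      rw [PySem.List.length_pyRange_one]; omega
    have hlen2 : (PySem.List.pyRange 0 t 2).length = bn := by
      rw [PySem.List.pyRange_of_pos 0 t (by norm_num)]
      rw [List.length_map, List.length_range, if_pos htp]
      omega
    have hflat : pvFlat data offset t
        = ((List.range n).map
            (fun y => pvRow data (offset + ((y * bn : Nat) : Int)) bn)).flatten := by
      unfold pvFlat
      rw [hmax, hb2, hbnn]
      rw [show (t * ((bn : Nat) : Int)) = ((n * bn : Nat) : Int) by
        rw [show t = (n : Int) by omega]; push_cast; ring]
      rw [PySem.List.pyRange_one, List.flatMap_map,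
        show (((n * bn : Nat) : Int) - 0).toNat = n * bn by omega]
      simp only [zero_add]
      rw [pvGroup data offset bn n, List.flatMap_def]
    rw [pvOuter_eq, hlen1, hlen2]
    simp only [List.nil_append]
    have hpr1 : PySem.List.pyRange 0 (max t 0) 1
        = (List.range n).map (fun (k : Nat) => (0 : Int) + (k : Int)) := by
      rw [hmax, PySem.List.pyRange_one, show ((t - 0).toNat) = n by omega]
    rw [hpr1, List.map_map]
    apply List.map_congr_left
    intro k hk
    have hkn : k < n := List.mem_range.mp hk
    simp only [Function.comp_apply, zero_add]
    rw [hb2, hbnn, hflat]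
    rw [show ((k : Int) * (2 * ((bn : Nat) : Int))) = ((k * (2 * bn) : Nat) : Int) by
      push_cast; ring]
    rw [show (((k : Int) + 1) * (2 * ((bn : Nat) : Int)))
        = ((k * (2 * bn) : Nat) : Int) + ((2 * bn : Nat) : Int) by push_cast; ring]
    rw [PySem.List.slice_natCast_add]
    rw [pvChunk (2 * bn) _ k ?hlens ?hrk]
    case hlens =>
      intro x hx
      obtain ⟨y, _, rfl⟩ := List.mem_map.mp hx
      exact pvRow_length data _ bn
    case hrk => simpa using hkn
    simp [List.getD_eq_getElem?_getD, List.getElem?_map, List.getElem?_range hkn]
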